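-- pv_equiv track=rewrite | github.com/Mitanshu56/JJE_PAYMENT | backend/app/utils/excel_parser.py | _extract_after_label_in_row
-- ===== SOURCE A (Python) =====
-- from typing import List, Dict, Tuple, Optional
--
-- def _extract_after_label_in_row(row_data: List[str], label_tokens: List[str]):
--     """Find label in row and return first non-empty value to its right."""
--     for i, cell in enumerate(row_data):
--         cell_lower = str(cell).lower()
--         if any(token in cell_lower for token in label_tokens):
--             for j in range(i + 1, len(row_data)):
--                 val = row_data[j]
--                 if val not in ("", None):
--                     return val
--     return None
-- ===== SOURCE B (Python) =====
-- def _extract_after_label_in_row(row_data, label_tokens):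
--     """Find label in row and return first non-empty value to its right."""
--     label_seen = False
--     for cell in row_data:
--         if label_seen:
--             if cell not in ("", None):
--                 return cell
--         elif any(token in str(cell).lower() for token in label_tokens):
--             label_seen = True
--     return None
-- ===== Notes on version B (the rewrite author's own statement) =====
-- stated objective: simpler
-- what changed: Replaced the nested loops (for each label match, rescan the rest of the row by index) with a single linear pass over the cells carrying a label_seen flag; correct because once any label cell has a non-empty cell after it, the first label cell already does.
import Mathlib
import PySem

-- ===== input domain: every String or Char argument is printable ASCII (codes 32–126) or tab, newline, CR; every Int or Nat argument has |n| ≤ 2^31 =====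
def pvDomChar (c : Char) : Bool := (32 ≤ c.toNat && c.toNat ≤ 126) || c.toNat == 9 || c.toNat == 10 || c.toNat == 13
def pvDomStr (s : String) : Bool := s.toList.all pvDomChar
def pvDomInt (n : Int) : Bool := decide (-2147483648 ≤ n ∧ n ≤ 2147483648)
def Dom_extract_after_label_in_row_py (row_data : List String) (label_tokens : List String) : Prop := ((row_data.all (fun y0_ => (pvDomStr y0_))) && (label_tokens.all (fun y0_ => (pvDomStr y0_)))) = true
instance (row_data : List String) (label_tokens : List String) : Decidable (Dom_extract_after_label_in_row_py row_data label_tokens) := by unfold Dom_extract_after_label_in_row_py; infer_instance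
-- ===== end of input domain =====

-- B replaces A's nested loops (rescan the rest of the row for each label match) with a
-- single linear pass carrying a `label_seen` flag; objective: simpler.

-- ===== PORT A =====
-- inner loop: for j in range(i+1, len(row_data)): val = row_data[j]; if val not in ("", None): return val
-- (cells are strings, so `val not in ("", None)` is `val ≠ ""`)
def pvAInner : List String → Option String
  | [] => none
  | v :: rest => if !(v == "") then some v else pvAInner rest

-- outer loop: for i, cell in enumerate(row_data): ... ; the suffix row_data[i+1:] is carried structurally
def pvAOuter (label_tokens : List String) : List String → Option String
  | [] => none
  | cell :: rest =>
    if label_tokens.any (fun token => PySem.Str.isIn token (PySem.Str.lower cell)) then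
      match pvAInner rest with
      | some v => some v
      | none => pvAOuter label_tokens rest
    else pvAOuter label_tokens rest

def extract_after_label_in_row_py (row_data : List String) (label_tokens : List String) : Option String :=
  pvAOuter label_tokens row_data

-- ===== PORT B =====
-- single pass with a boolean flag `label_seen`
def pvBLoop (label_tokens : List String) (label_seen : Bool) : List String → Option String
  | [] => none
  | cell :: rest =>
    if label_seen then
      if !(cell == "") then some cell else pvBLoop label_tokens label_seen rest
    else if label_tokens.any (fun token => PySem.Str.isIn token (PySem.Str.lower cell)) then
      pvBLoop label_tokens true rest
    else
      pvBLoop label_tokens label_seen rest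

def extract_after_label_in_row_py_alt (row_data : List String) (label_tokens : List String) : Option String :=
  pvBLoop label_tokens false row_data

-- ===== PRECONDITION & SPEC =====
def Spec_extract_after_label_in_row_py (row_data : List String) (label_tokens : List String) (out : Option String) : Prop := out = extract_after_label_in_row_py_alt row_data label_tokens
instance (row_data : List String) (label_tokens : List String) (out : Option String) : Decidable (Spec_extract_after_label_in_row_py row_data label_tokens out) := by unfold Spec_extract_after_label_in_row_py; infer_instance

-- ===== CLAIM (what is proved, stated in full; the proofs are below) =====
def Claim_equal_extract_after_label_in_row_py : Prop := ∀ (row_data : List String) (label_tokens : List String), Dom_extract_after_label_in_row_py row_data label_tokens → Spec_extract_after_label_in_row_py row_data label_tokens (extract_after_label_in_row_py row_data label_tokens)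

-- ===== LEMMAS AND PROOFS =====

-- with the flag set, B's loop is exactly A's inner scan
theorem pvBLoop_true (toks : List String) (l : List String) :
    pvBLoop toks true l = pvAInner l := by
  induction l with
  | nil => rfl
  | cons v rest ih =>
    simp only [pvBLoop, pvAInner, if_true]
    split <;> simp [ih]

-- if every cell is empty, A's inner scan finds nothing
theorem pvAInner_of_all_empty (l : List String) (h : ∀ v ∈ l, v = "") :
    pvAInner l = none := by
  induction l with
  | nil => rfl
  | cons v rest ih =>
    have : v = "" := h v (by simp)
    simp only [pvAInner, this]
    exact ih (fun w hw => h w (by simp [hw]))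

-- if every remaining cell is empty, A's outer loop returns none
theorem pvAOuter_all_empty (toks : List String) (l : List String)
    (h : ∀ v ∈ l, v = "") : pvAOuter toks l = none := by
  induction l with
  | nil => rfl
  | cons cell rest ih =>
    have hc : cell = "" := h cell (by simp)
    have hrest : ∀ v ∈ rest, v = "" := fun v hv => h v (by simp [hv])
    have hin : pvAInner rest = none := pvAInner_of_all_empty rest hrest
    simp only [pvAOuter, hin]
    split <;> exact ih hrest

-- if A's inner scan finds nothing, all cells are empty
theorem pvAInner_none (l : List String) (h : pvAInner l = none) : ∀ v ∈ l, v = "" := by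
  induction l with
  | nil => simp
  | cons v rest ih =>
    simp only [pvAInner] at h
    split at h
    · exact absurd h (by simp)
    · intro w hw
      rcases List.mem_cons.mp hw with rfl | hw'
      · simpa using ‹¬(!(w == "")) = true›
      · exact ih h w hw'

theorem pvAOuter_eq_pvBLoop (toks : List String) (l : List String) :
    pvAOuter toks l = pvBLoop toks false l := by
  induction l with
  | nil => rfl
  | cons cell rest ih =>
    simp only [pvAOuter, pvBLoop]
    split
    · rw [pvBLoop_true]
      cases hin : pvAInner rest with
      | some v => rfl
      | none => exact pvAOuter_all_empty toks rest (pvAInner_none rest hin)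
    · exact ih

-- ===== VERDICT (by name: the statement is the Claim_ definition above) =====
theorem extract_after_label_in_row_py_spec : Claim_equal_extract_after_label_in_row_py := by
  intro row_data label_tokens _
  unfold Spec_extract_after_label_in_row_py extract_after_label_in_row_py extract_after_label_in_row_py_alt
  exact pvAOuter_eq_pvBLoop label_tokens row_data
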